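-- pv_equiv track=rewrite | github.com/BLYKIM/python_before | mathexam.py | solution
-- ===== SOURCE A (Python) =====
-- def solution(answers):
--     answer = []
--     aa = [1, 2, 3, 4, 5]
--     ba = [2, 1, 2, 3, 2, 4, 2, 5]
--     ca = [3, 3, 1, 1, 2, 2, 4, 4, 5, 5]
--     score = [0, 0, 0]
--     for i in range(len(answers)):
--         if answers[i] == aa[i%5]:
--             score[0] += 1
--         if answers[i] == ba[i%8]:
--             score[1] += 1
--         if answers[i] == ca[i%10]:
--             score[2] += 1
--     mscore = max(score)
--     for s in range(3):
--         if score[s] == mscore: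
--             answer.append(s+1)
--
--     return answer
-- ===== SOURCE B (Python) =====
-- def solution(answers):
--     P = 40  # lcm of the three pattern lengths
--     pats = [[1, 2, 3, 4, 5],
--             [2, 1, 2, 3, 2, 4, 2, 5],
--             [3, 3, 1, 1, 2, 2, 4, 4, 5, 5]]
--     # unroll each pattern to one full common period
--     keys = [[pat[r % len(pat)] for r in range(P)] for pat in pats]
--     # single bucketing pass: group the answers by index residue mod P
--     buckets = {}
--     for i, a in enumerate(answers):
--         buckets.setdefault(i % P, []).append(a)
--     # each score is read off the buckets; the answers list is never rescanned
--     scores = [sum(buckets.get(r, []).count(key[r]) for r in range(P)) for key in keys]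
--     m = max(scores)
--     return [s for s, sc in enumerate(scores, 1) if sc == m]
-- ===== Notes on version B (the rewrite author's own statement) =====
-- stated objective: alternative
-- what changed: Instead of comparing each answer against three cyclic patterns index by index, B makes one bucketing pass that groups the answers in a dict keyed by index residue mod 40 (the patterns' common period), then reads each score off the bucket counts against length-40 unrolled keys without rescanning the answers.
import Mathlib
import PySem

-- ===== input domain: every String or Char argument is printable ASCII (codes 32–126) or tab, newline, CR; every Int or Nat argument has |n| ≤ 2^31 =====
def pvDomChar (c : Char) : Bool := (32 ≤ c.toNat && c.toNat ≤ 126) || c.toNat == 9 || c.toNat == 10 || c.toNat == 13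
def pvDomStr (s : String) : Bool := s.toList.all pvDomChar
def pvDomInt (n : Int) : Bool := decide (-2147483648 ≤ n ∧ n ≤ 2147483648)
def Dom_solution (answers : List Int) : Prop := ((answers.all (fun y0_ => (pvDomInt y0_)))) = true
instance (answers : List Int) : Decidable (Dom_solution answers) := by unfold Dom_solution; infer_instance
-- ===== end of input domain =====

-- B replaces A's per-index fused scoring loop by one bucketing pass (answers grouped by index residue mod 40, the common period) followed by reading each score off the bucket counts against length-40 unrolled keys (alternative decomposition, same cost).


-- ===== PORT A =====
-- Python A keeps score in a 3-element list updated in place; ported as a triple of accumulators.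
def solution (answers : List Int) : List Int :=
  let aa : List Int := [1, 2, 3, 4, 5]
  let ba : List Int := [2, 1, 2, 3, 2, 4, 2, 5]
  let ca : List Int := [3, 3, 1, 1, 2, 2, 4, 4, 5, 5]
  let score : Int × Int × Int :=
    (PySem.List.pyRange 0 answers.length 1).foldl
      (fun s i =>
        (if PySem.List.pyGetD answers i 0 = PySem.List.pyGetD aa (PySem.Int.mod i 5) 0 then s.1 + 1 else s.1,
         if PySem.List.pyGetD answers i 0 = PySem.List.pyGetD ba (PySem.Int.mod i 8) 0 then s.2.1 + 1 else s.2.1,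
         if PySem.List.pyGetD answers i 0 = PySem.List.pyGetD ca (PySem.Int.mod i 10) 0 then s.2.2 + 1 else s.2.2))
      (0, 0, 0)
  let mscore := max (max score.1 score.2.1) score.2.2
  (if score.1 = mscore then [(1 : Int)] else []) ++
  (if score.2.1 = mscore then [(2 : Int)] else []) ++
  (if score.2.2 = mscore then [(3 : Int)] else [])

-- ===== PORT B =====
-- [pat[r % len(pat)] for r in range(40)] : the pattern unrolled to the common period 40
def pvKeyOf (pat : List Int) : List Int :=
  (PySem.List.pyRange 0 40 1).map (fun r => PySem.List.pyGetD pat (PySem.Int.mod r (pat.length : Int)) 0)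

-- the bucketing pass: buckets.setdefault(i % 40, []).append(a) is dict-modify with default []
def pvBuckets (answers : List Int) : PySem.Dict Int (List Int) :=
  (PySem.List.enumerate answers 0).foldl
    (fun d p => d.modify (PySem.Int.mod p.1 40) [] (fun b => b ++ [p.2]))
    PySem.Dict.empty

-- sum(buckets.get(r, []).count(key[r]) for r in range(40))
def pvScore (buckets : PySem.Dict Int (List Int)) (key : List Int) : Int :=
  (PySem.List.pyRange 0 40 1).foldl
    (fun acc r => acc + (PySem.List.count (buckets.getD r []) (PySem.List.pyGetD key r 0) : Int)) 0

def solution_alt (answers : List Int) : List Int :=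
  let pats : List (List Int) := [[1, 2, 3, 4, 5], [2, 1, 2, 3, 2, 4, 2, 5], [3, 3, 1, 1, 2, 2, 4, 4, 5, 5]]
  let keys := pats.map pvKeyOf
  let buckets := pvBuckets answers
  let scores := keys.map (pvScore buckets)
  let m := scores.foldl max (scores.headD 0)    -- max(scores) on this nonempty list
  ((PySem.List.enumerate scores 1).filter (fun p => p.2 = m)).map (·.1)

-- ===== PRECONDITION & SPEC =====
def Spec_solution (answers : List Int) (out : List Int) : Prop := out = solution_alt answers
instance (answers : List Int) (out : List Int) : Decidable (Spec_solution answers out) := by unfold Spec_solution; infer_instance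

-- ===== CLAIM (what is proved, stated in full; the proofs are below) =====
def Claim_equal_solution : Prop := ∀ (answers : List Int), Dom_solution answers → Spec_solution answers (solution answers)

-- ===== LEMMAS AND PROOFS =====

-- common specification: matches of `answers` (enumerated) against pat cycled with modulus m
def pvCnt (pat : List Int) (m : Int) (answers : List Int) : Int :=
  ((PySem.List.enumerate answers 0).countP (fun p => p.2 == PySem.List.pyGetD pat (PySem.Int.mod p.1 m) 0) : Int)

-- A's fused fold is the triple of the three match counts
theorem fused_eq (answers : List Int) :
    (PySem.List.pyRange 0 (answers.length : Int) 1).foldl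
      (fun (s : Int × Int × Int) i =>
        (if PySem.List.pyGetD answers i 0 = PySem.List.pyGetD [1,2,3,4,5] (PySem.Int.mod i 5) 0 then s.1 + 1 else s.1,
         if PySem.List.pyGetD answers i 0 = PySem.List.pyGetD [2,1,2,3,2,4,2,5] (PySem.Int.mod i 8) 0 then s.2.1 + 1 else s.2.1,
         if PySem.List.pyGetD answers i 0 = PySem.List.pyGetD [3,3,1,1,2,2,4,4,5,5] (PySem.Int.mod i 10) 0 then s.2.2 + 1 else s.2.2))
      (0, 0, 0)
    = (pvCnt [1,2,3,4,5] 5 answers,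
       pvCnt [2,1,2,3,2,4,2,5] 8 answers,
       pvCnt [3,3,1,1,2,2,4,4,5,5] 10 answers) := by
  rw [PySem.List.foldl_prod_mk
        (f := fun acc (i : Int) => if PySem.List.pyGetD answers i 0 = PySem.List.pyGetD [1,2,3,4,5] (PySem.Int.mod i 5) 0 then acc + 1 else acc)
        (g := fun (s : Int × Int) (i : Int) =>
          (if PySem.List.pyGetD answers i 0 = PySem.List.pyGetD [2,1,2,3,2,4,2,5] (PySem.Int.mod i 8) 0 then s.1 + 1 else s.1,
           if PySem.List.pyGetD answers i 0 = PySem.List.pyGetD [3,3,1,1,2,2,4,4,5,5] (PySem.Int.mod i 10) 0 then s.2 + 1 else s.2)),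
      PySem.List.foldl_prod_mk
        (f := fun acc (i : Int) => if PySem.List.pyGetD answers i 0 = PySem.List.pyGetD [2,1,2,3,2,4,2,5] (PySem.Int.mod i 8) 0 then acc + 1 else acc)
        (g := fun acc (i : Int) => if PySem.List.pyGetD answers i 0 = PySem.List.pyGetD [3,3,1,1,2,2,4,4,5,5] (PySem.Int.mod i 10) 0 then acc + 1 else acc)]
  unfold pvCnt
  rw [PySem.List.enumerate_eq_map_pyRange (d := 0)]
  simp only [List.countP_map, PySem.List.len_eq]
  congr 1 <;> [skip; congr 1] <;>
  · rw [PySem.List.foldl_ite_add_one]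
    simp only [zero_add, Nat.cast_inj]
    apply List.countP_congr
    intro x _
    simp [Function.comp]

-- the bucket at residue r holds exactly the answers whose index ≡ r (mod 40), in order
theorem buckets_getD (answers : List Int) (r : Int) :
    (pvBuckets answers).getD r [] =
      ((PySem.List.enumerate answers 0).filter (fun p => PySem.Int.mod p.1 40 == r)).map (·.2) := by
  unfold pvBuckets
  rw [show (PySem.List.enumerate answers 0).foldl
        (fun d p => d.modify (PySem.Int.mod p.1 40) [] (fun b => b ++ [p.2])) PySem.Dict.empty
      = ((PySem.List.enumerate answers 0).map (fun p => (PySem.Int.mod p.1 40, p.2))).foldl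
        (fun (d : PySem.Dict Int (List Int)) q => d.modify q.1 [] (fun b => b ++ [q.2])) PySem.Dict.empty
      from (List.foldl_map (f := fun (p : Int × Int) => (PySem.Int.mod p.1 40, p.2))
             (g := fun (d : PySem.Dict Int (List Int)) q => d.modify q.1 [] (fun b => b ++ [q.2]))
             (l := PySem.List.enumerate answers 0) (init := PySem.Dict.empty)).symm,
      PySem.Dict.getD_foldl_modify_append]
  simp only [PySem.Dict.getD_empty, List.nil_append]
  rw [List.filter_map, List.map_map]
  rfl

-- sum over a duplicate-free list of a function vanishing off t
theorem sum_map_ite_eq_of_nodup (R : List Int) (t : Int) (x : Int)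
    (hR : R.Nodup) (ht : t ∈ R) :
    (R.map (fun r => if r = t then x else 0)).sum = x := by
  induction R with
  | nil => cases ht
  | cons a R ih =>
    rcases List.mem_cons.mp ht with h | h
    · subst h
      have hz : (R.map (fun r => if r = t then x else 0)).sum = 0 := by
        apply List.sum_eq_zero
        intro y hy
        rcases List.mem_map.mp hy with ⟨r, hr, rfl⟩
        have hne : r ≠ t := fun he => (List.nodup_cons.mp hR).1 (he ▸ hr)
        simp [hne]
      simp [hz]
    · have hna : a ≠ t := fun he => (List.nodup_cons.mp hR).1 (he ▸ h)
      simp [hna, ih (List.nodup_cons.mp hR).2 h]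

-- summing one bucket count per residue recovers the direct match count
theorem sum_count_buckets (key : Int → Int) (R : List Int) (hR : R.Nodup)
    (l : List (Int × Int)) (h : ∀ p ∈ l, PySem.Int.mod p.1 40 ∈ R) :
    (R.map (fun r => (↑(List.count (key r) ((l.filter (fun p => PySem.Int.mod p.1 40 == r)).map (·.2))) : Int))).sum
      = (l.countP (fun p => p.2 == key (PySem.Int.mod p.1 40)) : Int) := by
  induction l with
  | nil => simp
  | cons p t ih =>
    have ht : ∀ q ∈ t, PySem.Int.mod q.1 40 ∈ R := fun q hq => h q (List.mem_cons_of_mem _ hq)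
    have hp : PySem.Int.mod p.1 40 ∈ R := h p List.mem_cons_self
    have hsplit : ∀ r : Int,
        (↑(List.count (key r) (((p :: t).filter (fun q => PySem.Int.mod q.1 40 == r)).map (·.2))) : Int)
        = (if r = PySem.Int.mod p.1 40 then (if p.2 = key r then (1 : Int) else 0) else 0)
          + ↑(List.count (key r) ((t.filter (fun q => PySem.Int.mod q.1 40 == r)).map (·.2))) := by
      intro r
      by_cases hr : PySem.Int.mod p.1 40 = r
      · subst hr
        simp only [List.filter_cons, beq_self_eq_true, if_true, List.map_cons, List.count_cons]
        push_cast
        split_ifs <;> simp_all <;> omega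
      · rw [List.filter_cons, if_neg (by simpa using hr), if_neg (fun he => hr he.symm), zero_add]
    have hstep : (R.map (fun r => (↑(List.count (key r) (((p :: t).filter (fun q => PySem.Int.mod q.1 40 == r)).map (·.2))) : Int))).sum
        = (R.map (fun r => if r = PySem.Int.mod p.1 40 then (if p.2 = key r then (1 : Int) else 0) else 0)).sum
          + (R.map (fun r => (↑(List.count (key r) ((t.filter (fun q => PySem.Int.mod q.1 40 == r)).map (·.2))) : Int))).sum := by
      rw [← List.sum_map_add]
      exact congrArg List.sum (List.map_congr_left (fun r _ => hsplit r))
    rw [hstep, ih ht]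
    have hone : (R.map (fun r => if r = PySem.Int.mod p.1 40 then (if p.2 = key r then (1 : Int) else 0) else 0)).sum
        = (if p.2 = key (PySem.Int.mod p.1 40) then (1 : Int) else 0) := by
      rw [show (fun r => if r = PySem.Int.mod p.1 40 then (if p.2 = key r then (1 : Int) else 0) else 0)
            = (fun r => if r = PySem.Int.mod p.1 40 then (if p.2 = key (PySem.Int.mod p.1 40) then (1 : Int) else 0) else 0) from
        funext fun r => by
          by_cases hr : r = PySem.Int.mod p.1 40
          · subst hr; rfl
          · rw [if_neg hr, if_neg hr]]
      exact sum_map_ite_eq_of_nodup R _ _ hR hp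
    rw [hone, List.countP_cons]
    by_cases hv : p.2 = key (PySem.Int.mod p.1 40) <;> simp [hv] <;> omega

-- the unrolled key agrees with cycling the pattern, whenever the pattern length divides 40
theorem keyOf_spec (pat : List Int) (hdvd : pat.length ∣ 40) (k : Nat) :
    PySem.List.pyGetD (pvKeyOf pat) (PySem.Int.mod (k : Int) 40) 0
      = PySem.List.pyGetD pat (PySem.Int.mod (k : Int) (pat.length : Int)) 0 := by
  unfold pvKeyOf
  rw [PySem.List.pyGetD_map_pyRange_of_nonneg _ _ _ _ (PySem.Int.mod_nonneg _ (by norm_num)) (PySem.Int.mod_lt _ (by norm_num))]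
  have h40 : PySem.Int.mod (k : Int) 40 = ((k % 40 : Nat) : Int) := by exact_mod_cast PySem.Int.mod_natCast k 40
  have hL : PySem.Int.mod ((k % 40 : Nat) : Int) (pat.length : Int) = ((k % 40 % pat.length : Nat) : Int) := by
    exact_mod_cast PySem.Int.mod_natCast (k % 40) pat.length
  have hLk : PySem.Int.mod (k : Int) (pat.length : Int) = ((k % pat.length : Nat) : Int) := by
    exact_mod_cast PySem.Int.mod_natCast k pat.length
  rw [h40, hL, hLk, Nat.mod_mod_of_dvd k hdvd]

-- B's score against the unrolled key of `pat` is the direct match count of `pat`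
theorem scoreB_eq (pat : List Int) (hdvd : pat.length ∣ 40) (answers : List Int) :
    pvScore (pvBuckets answers) (pvKeyOf pat) = pvCnt pat (pat.length : Int) answers := by
  unfold pvScore
  rw [PySem.List.foldl_add]
  simp only [buckets_getD, PySem.List.count_eq, zero_add]
  rw [sum_count_buckets (fun r => PySem.List.pyGetD (pvKeyOf pat) r 0) _ (PySem.List.nodup_pyRange_one 0 40)
        _ (fun p _ => PySem.List.mem_pyRange_one.mpr ⟨PySem.Int.mod_nonneg _ (by norm_num), PySem.Int.mod_lt _ (by norm_num)⟩)]
  unfold pvCnt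
  congr 1
  apply List.countP_congr
  intro p hp
  rcases (PySem.List.mem_enumerate_iff _ _ _).mp hp with ⟨k, hk, rfl⟩
  simp only [zero_add]
  rw [keyOf_spec pat hdvd k]

-- A's tail (max then append per index) equals B's tail (filter-map over enumerate), for any three scores
theorem tail_eq (A1 A2 A3 : Int) :
    (if A1 = max (max A1 A2) A3 then [(1 : Int)] else []) ++
    (if A2 = max (max A1 A2) A3 then [(2 : Int)] else []) ++
    (if A3 = max (max A1 A2) A3 then [(3 : Int)] else [])
    = ((PySem.List.enumerate ([A1, A2, A3] : List Int) 1).filter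
        (fun p => p.2 = ([A1, A2, A3] : List Int).foldl max (([A1, A2, A3] : List Int).headD 0))).map (·.1) := by
  have h : ([A1, A2, A3] : List Int).foldl max (([A1, A2, A3] : List Int).headD 0) = max (max A1 A2) A3 := by
    simp [List.foldl, max_self]
  rw [h]
  generalize max (max A1 A2) A3 = M
  simp only [PySem.List.enumerate_cons, PySem.List.enumerate_nil, List.filter_cons,
             List.filter_nil, decide_eq_true_eq]
  split_ifs <;> rfl

theorem solution_spec_aux (answers : List Int) : solution answers = solution_alt answers := by
  unfold solution solution_alt
  simp only [fused_eq, List.map_cons, List.map_nil,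
             scoreB_eq [1,2,3,4,5] (by norm_num),
             scoreB_eq [2,1,2,3,2,4,2,5] (by norm_num),
             scoreB_eq [3,3,1,1,2,2,4,4,5,5] (by norm_num)]
  exact tail_eq _ _ _

-- ===== VERDICT (by name: the statement is the Claim_ definition above) =====
theorem solution_spec : Claim_equal_solution := by
  intro answers _
  exact solution_spec_aux answers
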